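-- pv_equiv track=rewrite | github.com/whoami-10101/cloud | cloud-5.py | calculate_waiting_time
-- ===== SOURCE A (Python) =====
-- def calculate_waiting_time(schedule):
--     waiting_times = []
--     completion_times = []
--     current_completion_time = 0
--
--     for processor_tasks in schedule:
--         wait_time = current_completion_time
--         for task_time in processor_tasks:
--             waiting_times.append(wait_time)
--             current_completion_time += task_time
--             completion_times.append(current_completion_time)
--             wait_time += task_time
--
--     return waiting_times, completion_times
-- ===== SOURCE B (Python) =====
-- def calculate_waiting_time(schedule):
--     # Build completion times BACK-TO-FRONT: start from the grand total and
--     # subtract each task walking the flattened schedule in reverse; then each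
--     # waiting time is its completion time minus its own task time.
--     tasks = [t for proc in schedule for t in proc]
--     remaining = sum(tasks)
--     completion_times = []
--     for t in reversed(tasks):
--         completion_times.append(remaining)
--         remaining -= t
--     completion_times.reverse()
--     waiting_times = [c - t for c, t in zip(completion_times, tasks)]
--     return waiting_times, completion_times
-- ===== Notes on version B (the rewrite author's own statement) =====
-- stated objective: alternative
-- what changed: Instead of A's forward nested loop with two running accumulators, B flattens the schedule, builds completion times back-to-front by subtracting tasks from the grand total over the reversed list, and derives each waiting time as completion minus its own task (exact on ints).
import Mathlib
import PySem

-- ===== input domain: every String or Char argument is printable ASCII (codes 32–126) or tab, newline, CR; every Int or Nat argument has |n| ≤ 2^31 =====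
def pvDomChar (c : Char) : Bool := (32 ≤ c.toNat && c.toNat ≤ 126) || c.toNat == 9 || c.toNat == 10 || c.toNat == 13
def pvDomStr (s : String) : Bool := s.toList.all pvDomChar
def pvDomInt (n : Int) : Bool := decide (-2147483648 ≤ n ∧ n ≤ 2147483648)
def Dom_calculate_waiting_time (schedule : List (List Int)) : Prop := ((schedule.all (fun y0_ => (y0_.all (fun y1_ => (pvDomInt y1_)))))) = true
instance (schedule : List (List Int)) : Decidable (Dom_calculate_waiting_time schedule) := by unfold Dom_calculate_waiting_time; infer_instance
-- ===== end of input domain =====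

-- B builds completion times back-to-front from the grand total and gets each waiting
-- time as completion minus its own task (alternative algorithm, same cost; exact on ints).

-- ===== PORT A =====
-- state: (waiting_times, completion_times, current_completion_time)
def pvAStep (st : List Int × List Int × Int) (processor_tasks : List Int) :
    List Int × List Int × Int :=
  -- inner state: (waiting_times, completion_times, current_completion_time, wait_time)
  let inner : List Int × List Int × Int × Int := processor_tasks.foldl
    (fun st2 task_time =>
      (st2.1 ++ [st2.2.2.2],
       st2.2.1 ++ [st2.2.2.1 + task_time],
       st2.2.2.1 + task_time,
       st2.2.2.2 + task_time))
    (st.1, st.2.1, st.2.2, st.2.2)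
  (inner.1, inner.2.1, inner.2.2.1)

def calculate_waiting_time (schedule : List (List Int)) : List Int × List Int :=
  let s : List Int × List Int × Int := schedule.foldl pvAStep ([], [], 0)
  (s.1, s.2.1)

-- ===== PORT B =====
def calculate_waiting_time_alt (schedule : List (List Int)) : List Int × List Int :=
  let tasks := schedule.flatMap id
  -- for t in reversed(tasks): append remaining; remaining -= t
  let loop : List Int × Int := tasks.reverse.foldl
    (fun (p : List Int × Int) t => (p.1 ++ [p.2], p.2 - t)) ([], tasks.sum)
  let completion_times := loop.1.reverse
  let waiting_times := List.zipWith (fun c t => c - t) completion_times tasks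
  (waiting_times, completion_times)

-- ===== PRECONDITION & SPEC =====
def Spec_calculate_waiting_time (schedule : List (List Int)) (out : List Int × List Int) : Prop := out = calculate_waiting_time_alt schedule
instance (schedule : List (List Int)) (out : List Int × List Int) : Decidable (Spec_calculate_waiting_time schedule out) := by unfold Spec_calculate_waiting_time; infer_instance

-- ===== CLAIM =====
def Claim_equal_calculate_waiting_time : Prop := ∀ (schedule : List (List Int)), Dom_calculate_waiting_time schedule → Spec_calculate_waiting_time schedule (calculate_waiting_time schedule)

-- ===== LEMMAS AND PROOFS =====

-- reference: pvRef a ts = (waiting list, completion list) for flat task list ts starting at a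
def pvRef (a : Int) : List Int → List Int × List Int
  | [] => ([], [])
  | t :: ts =>
    let p := pvRef (a + t) ts
    (a :: p.1, (a + t) :: p.2)

theorem pvRef_append (a : Int) (xs ys : List Int) :
    pvRef a (xs ++ ys) =
      ((pvRef a xs).1 ++ (pvRef (a + xs.sum) ys).1,
       (pvRef a xs).2 ++ (pvRef (a + xs.sum) ys).2) := by
  induction xs generalizing a with
  | nil => simp [pvRef]
  | cons x xs ih => simp [pvRef, ih, add_assoc]

-- A's inner loop (with wait_time = current_completion_time) computed via pvRef
theorem innerFold_eq (ts : List Int) (w c : List Int) (a : Int) :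
    ts.foldl
      (fun (st2 : List Int × List Int × Int × Int) task_time =>
        (st2.1 ++ [st2.2.2.2],
         st2.2.1 ++ [st2.2.2.1 + task_time],
         st2.2.2.1 + task_time,
         st2.2.2.2 + task_time)) (w, c, a, a)
      = (w ++ (pvRef a ts).1, c ++ (pvRef a ts).2, a + ts.sum, a + ts.sum) := by
  induction ts generalizing w c a with
  | nil => simp [pvRef]
  | cons t ts ih => simp [pvRef, ih, add_assoc]

-- A's outer loop computed via pvRef on the flattened schedule
theorem outerFold_eq (schedule : List (List Int)) (w c : List Int) (a : Int) :
    schedule.foldl pvAStep (w, c, a)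
      = (w ++ (pvRef a (schedule.flatMap id)).1,
         c ++ (pvRef a (schedule.flatMap id)).2,
         a + (schedule.flatMap id).sum) := by
  induction schedule generalizing w c a with
  | nil => simp [pvRef]
  | cons ps rest ih =>
    rw [List.foldl_cons]
    have h : pvAStep (w, c, a) ps
        = (w ++ (pvRef a ps).1, c ++ (pvRef a ps).2, a + ps.sum) := by
      simp [pvAStep, innerFold_eq]
    rw [h, ih]
    simp [pvRef_append, add_assoc]

-- B's backward loop (written as foldr via foldl_reverse) computed via pvRef
theorem revLoop_eq (ts : List Int) (a : Int) :
    ts.foldr (fun t (p : List Int × Int) => (p.1 ++ [p.2], p.2 - t)) ([], a + ts.sum)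
      = ((pvRef a ts).2.reverse, a) := by
  induction ts generalizing a with
  | nil => simp [pvRef]
  | cons t ts ih =>
    have h : a + (t :: ts).sum = (a + t) + ts.sum := by simp [add_assoc]
    rw [List.foldr_cons, h, ih (a + t)]
    simp [pvRef]

-- waiting time = completion time minus own task
theorem zip_sub_eq (ts : List Int) (a : Int) :
    List.zipWith (fun c t => c - t) (pvRef a ts).2 ts = (pvRef a ts).1 := by
  induction ts generalizing a with
  | nil => simp [pvRef]
  | cons t ts ih => simp [pvRef, ih]

-- ===== VERDICT =====
theorem calculate_waiting_time_spec : Claim_equal_calculate_waiting_time := by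
  intro schedule _
  unfold Spec_calculate_waiting_time calculate_waiting_time calculate_waiting_time_alt
  simp only [List.foldl_reverse]
  have hrev := revLoop_eq (schedule.flatMap id) 0
  rw [zero_add] at hrev
  simp only [outerFold_eq, List.nil_append, hrev, List.reverse_reverse, zip_sub_eq]
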